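-- pv_equiv track=rewrite | github.com/Crystallee612/uroboros | src/analysis/reassemble_symbol_get.py | adjust_globallabel
-- ===== SOURCE A (Python) =====
-- def adjust_globallabel(g_bss, instr_list):
--     g_bss = filter(lambda e: '@' in e[1], g_bss)
--     gbss_hs = {'S_0x' + e[0].lstrip('0'): e[1].split('@')[0] if '@' in e[1] else e[1] for e in g_bss}
--     labels = gbss_hs.keys()
--     def mapper(l):
--         r = next((lab for lab in labels if lab in l), None)
--         if r is not None: return l.replace(r, gbss_hs[r], 1)
--         return l
--     return map(mapper, instr_list)
-- ===== SOURCE B (Python) =====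
-- def adjust_globallabel(g_bss, instr_list):
--     repl = {'S_0x' + k.lstrip('0'): v.split('@')[0] for k, v in g_bss if '@' in v}
--     if not repl:
--         return list(instr_list)
--     labels = list(repl)
--     rank = {lab: i for i, lab in enumerate(labels)}
--     maxlen = max(map(len, labels))
--     out = []
--     for l in instr_list:
--         hits = [rank[l[j:e]]
--                 for j in range(len(l) - 3) if l.startswith('S_0x', j)
--                 for e in range(j + 4, min(len(l), j + maxlen) + 1)
--                 if l[j:e] in rank]
--         if hits:
--             lab = labels[min(hits)]
--             out.append(l.replace(lab, repl[lab], 1))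
--         else:
--             out.append(l)
--     return out
-- ===== Notes on version B (the rewrite author's own statement) =====
-- stated objective: faster
-- what changed: A scans the whole label list per instruction ('lab in l' for every label); B builds the replacement dict plus a label->rank dict once and scans each instruction's positions a single time, looking up only the substrings anchored at 'S_0x' and replacing the lowest-rank label found.
import Mathlib
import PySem

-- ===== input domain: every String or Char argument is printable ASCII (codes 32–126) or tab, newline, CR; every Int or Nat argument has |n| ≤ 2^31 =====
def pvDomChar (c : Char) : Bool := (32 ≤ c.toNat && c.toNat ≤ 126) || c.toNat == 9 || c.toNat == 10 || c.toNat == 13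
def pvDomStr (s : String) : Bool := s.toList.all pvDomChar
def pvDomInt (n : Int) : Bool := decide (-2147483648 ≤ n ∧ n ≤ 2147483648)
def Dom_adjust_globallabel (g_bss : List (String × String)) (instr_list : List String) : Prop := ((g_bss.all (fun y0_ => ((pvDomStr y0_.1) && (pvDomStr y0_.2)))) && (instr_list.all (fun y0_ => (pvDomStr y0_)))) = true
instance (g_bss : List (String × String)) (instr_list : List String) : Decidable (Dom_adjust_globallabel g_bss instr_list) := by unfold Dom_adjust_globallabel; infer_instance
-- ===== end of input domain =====

-- B replaces A's per-instruction scan over ALL labels ('lab in l' for each label) by one scan over the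
-- instruction's positions: substrings anchored at 'S_0x' are looked up in a rank dictionary and the
-- smallest-rank label wins; objective: faster when there are many labels.
-- Return-value equivalence only (neither version mutates its arguments).

-- Shared expression-level helpers (the same Python subexpressions occur in A and B):
-- 'S_0x' + k.lstrip('0') — lstrip with the single-char set '0' is exactly dropWhile (· == '0')
def pvLabel (k : String) : List Char := "S_0x".toList ++ k.toList.dropWhile (· == '0')
-- v.split('@')[0]; split on a nonempty sep is never empty, headD unreachable
def pvRepl (v : String) : List Char := (PySem.Chars.splitOn v.toList "@".toList).headD []
-- l.replace(old, new, 1): replace the FIRST occurrence only (old = '' inserts new in front)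
def pvReplace1Go (old new : List Char) : List Char → List Char
  | [] => []
  | c :: t => if old.isPrefixOf (c :: t) then new ++ (c :: t).drop old.length else c :: pvReplace1Go old new t

def pvReplace1 (s old new : List Char) : List Char :=
  if old = [] then new ++ s else pvReplace1Go old new s

-- ===== PORT A =====
def pvDictA (g_bss : List (String × String)) : PySem.Dict (List Char) (List Char) :=
  (g_bss.filter (fun e => PySem.Chars.isIn "@".toList e.2.toList)).foldl
    (fun d e => d.insert (pvLabel e.1)
      (if PySem.Chars.isIn "@".toList e.2.toList then pvRepl e.2 else e.2.toList)) PySem.Dict.empty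

-- mapper: r = next((lab for lab in labels if lab in l), None); replace first occurrence
def pvMapperA (d : PySem.Dict (List Char) (List Char)) (l : String) : String :=
  match d.keys.find? (fun lab => PySem.Chars.isIn lab l.toList) with
  | some r => String.ofList (pvReplace1 l.toList r (d.getD r []))
  | none => l

def adjust_globallabel (g_bss : List (String × String)) (instr_list : List String) : List String :=
  instr_list.map (pvMapperA (pvDictA g_bss))

-- ===== PORT B =====
-- repl = {'S_0x' + k.lstrip('0'): v.split('@')[0] for k, v in g_bss if '@' in v}
def pvDictB (g_bss : List (String × String)) : PySem.Dict (List Char) (List Char) :=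
  (g_bss.filter (fun e => PySem.Chars.isIn "@".toList e.2.toList)).foldl
    (fun d e => d.insert (pvLabel e.1) (pvRepl e.2)) PySem.Dict.empty

-- rank = {lab: i for i, lab in enumerate(labels)}
def pvRankB (labels : List (List Char)) : PySem.Dict (List Char) Nat :=
  labels.zipIdx.foldl (fun d p => d.insert p.1 p.2) PySem.Dict.empty

-- hits = [rank[l[j:e]] for j … if l.startswith('S_0x', j) for e … if l[j:e] in rank]
-- (membership test + lookup fused into filterMap get?; l[j:e] with 0 ≤ j ≤ e is (drop j).take (e - j))
def pvHitsB (rank : PySem.Dict (List Char) Nat) (maxlen : Nat) (cs : List Char) : List Nat :=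
  (List.range (cs.length - 3)).flatMap (fun j =>
    if PySem.Chars.startswith (cs.drop j) "S_0x".toList then
      (List.range' (j + 4) (min cs.length (j + maxlen) + 1 - (j + 4))).filterMap (fun e =>
        rank.get? ((cs.drop j).take (e - j)))
    else [])

-- if hits: lab = labels[min(hits)]; l.replace(lab, repl[lab], 1)  (min? none ↔ hits empty;
-- labels[m]? is a totality guard: m is always in range)
def pvMapperB (repl : PySem.Dict (List Char) (List Char)) (labels : List (List Char))
    (rank : PySem.Dict (List Char) Nat) (maxlen : Nat) (l : String) : String :=
  match PySem.List.min? (pvHitsB rank maxlen l.toList) id with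
  | some m =>
      match labels[m]? with
      | some lab => String.ofList (pvReplace1 l.toList lab (repl.getD lab []))
      | none => l
  | none => l

def adjust_globallabel_alt (g_bss : List (String × String)) (instr_list : List String) : List String :=
  if (pvDictB g_bss).items = [] then instr_list
  else instr_list.map (pvMapperB (pvDictB g_bss) (pvDictB g_bss).keys (pvRankB (pvDictB g_bss).keys)
    ((PySem.List.max? ((pvDictB g_bss).keys.map List.length) id).getD 0))

-- ===== PRECONDITION & SPEC =====
def Spec_adjust_globallabel (g_bss : List (String × String)) (instr_list : List String) (out : List String) : Prop := out = adjust_globallabel_alt g_bss instr_list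
instance (g_bss : List (String × String)) (instr_list : List String) (out : List String) : Decidable (Spec_adjust_globallabel g_bss instr_list out) := by unfold Spec_adjust_globallabel; infer_instance

-- ===== CLAIM (what is proved, stated in full; the proofs are below) =====
def Claim_equal_adjust_globallabel : Prop := ∀ (g_bss : List (String × String)) (instr_list : List String), Dom_adjust_globallabel g_bss instr_list → Spec_adjust_globallabel g_bss instr_list (adjust_globallabel g_bss instr_list)

-- ===== LEMMAS AND PROOFS =====

-- the two dictionary builds coincide: inside the filter the '@' test of A's value expression is true
lemma pvDictB_eq (g_bss : List (String × String)) : pvDictB g_bss = pvDictA g_bss := by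
  unfold pvDictA pvDictB
  apply PySem.List.foldl_congr_mem
  intro d e he
  have h := List.of_mem_filter he
  simp only [h, if_true]

lemma pvNodupA (g_bss : List (String × String)) : (pvDictA g_bss).keys.Nodup := by
  unfold pvDictA
  exact PySem.Dict.nodup_keys_foldl_insert_key
    (g_bss.filter (fun e => PySem.Chars.isIn "@".toList e.2.toList))
    (fun e => pvLabel e.1)
    (fun _ e => if PySem.Chars.isIn "@".toList e.2.toList then pvRepl e.2 else e.2.toList)
    PySem.Dict.empty (by simp [PySem.Dict.keys_empty])

lemma pvKeyShape (g_bss : List (String × String)) {lab : List Char}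
    (h : lab ∈ (pvDictA g_bss).keys) : "S_0x".toList <+: lab := by
  have hk : (pvDictA g_bss).keys =
      PySem.Set.ofList ((g_bss.filter (fun e => PySem.Chars.isIn "@".toList e.2.toList)).map
        (fun e => pvLabel e.1)) := by
    unfold pvDictA
    rw [PySem.Dict.keys_foldl_insert_key
      (g_bss.filter (fun e => PySem.Chars.isIn "@".toList e.2.toList))
      (fun e => pvLabel e.1)
      (fun _ e => if PySem.Chars.isIn "@".toList e.2.toList then pvRepl e.2 else e.2.toList)
      PySem.Dict.empty]
    simp [PySem.Dict.keys_empty]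
    rfl
  rw [hk] at h
  have h2 := (PySem.Set.mem_ofList _ _).mp h
  obtain ⟨e, _, he⟩ := List.mem_map.mp h2
  rw [← he]
  exact List.prefix_append _ _

-- the rank dictionary is just the indexed label list
lemma pvRankB_items (labels : List (List Char)) (hnd : labels.Nodup) :
    (pvRankB labels).items = labels.zipIdx := by
  unfold pvRankB
  rw [PySem.Dict.items_foldl_insert_fresh labels.zipIdx Prod.fst Prod.snd PySem.Dict.empty
    (by intro a _; simp [PySem.Dict.contains_empty])
    (by rw [List.zipIdx_map_fst]; exact hnd)]
  simp [PySem.Dict.empty]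

lemma pvRank_get (labels : List (List Char)) (hnd : labels.Nodup) (lab : List Char) (i : Nat) :
    (pvRankB labels).get? lab = some i ↔ labels[i]? = some lab := by
  have hkeys : (pvRankB labels).keys = labels := by
    show (pvRankB labels).items.map Prod.fst = labels
    rw [pvRankB_items labels hnd, List.zipIdx_map_fst]
  constructor
  · intro h
    have hm := PySem.Dict.mem_items_of_get?_eq_some _ h
    rw [pvRankB_items labels hnd] at hm
    exact List.mem_zipIdx_iff_getElem?.mp hm
  · intro h
    apply PySem.Dict.get?_of_mem_items
    · rw [pvRankB_items labels hnd]
      exact List.mem_zipIdx_iff_getElem?.mpr h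
    · rw [hkeys]; exact hnd

-- maxlen bounds every key's length
lemma pvOptFoldSome {A B : Type} (f : Option A → B → Option A)
    (hf : ∀ a x, (f (some a) x).isSome) : ∀ (t : List B) (a : A), (t.foldl f (some a)).isSome := by
  intro t
  induction t with
  | nil => intro a; simp
  | cons b t ih =>
      intro a
      simp only [List.foldl_cons]
      obtain ⟨y, hy⟩ := Option.isSome_iff_exists.mp (hf a b)
      rw [hy]
      exact ih y

lemma pvMaxlen (labels : List (List Char)) :
    ∀ lab ∈ labels, lab.length ≤ ((PySem.List.max? (labels.map List.length) id).getD 0) := by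
  intro lab hmem
  cases hm : PySem.List.max? (labels.map List.length) id with
  | none =>
      exfalso
      cases hl : labels.map List.length with
      | nil =>
          rw [List.map_eq_nil_iff] at hl
          rw [hl] at hmem
          simp at hmem
      | cons a t =>
          rw [hl] at hm
          have hiso : (PySem.List.max? (a :: t) id).isSome := by
            rw [PySem.List.max?]
            simp only [List.foldl_cons]
            show (List.foldl _ (some a) t).isSome
            apply pvOptFoldSome
            intro c x
            dsimp only
            split <;> simp
          rw [hm] at hiso
          simp at hiso
  | some m =>
      have := PySem.List.max?_isMax hm lab.length (List.mem_map_of_mem hmem)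
      simpa using this

-- hits of an instruction = ranks of the keys occurring in it
lemma pvHits_mem (g_bss : List (String × String)) (cs : List Char) (m : Nat) :
    m ∈ pvHitsB (pvRankB (pvDictA g_bss).keys)
        ((PySem.List.max? ((pvDictA g_bss).keys.map List.length) id).getD 0) cs ↔
      ∃ lab, (pvDictA g_bss).keys[m]? = some lab ∧ PySem.Chars.isIn lab cs = true := by
  have hnd := pvNodupA g_bss
  constructor
  · intro h
    unfold pvHitsB at h
    obtain ⟨j, hj, hc⟩ := List.mem_flatMap.mp h
    by_cases ha : PySem.Chars.startswith (cs.drop j) "S_0x".toList = true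
    · rw [if_pos ha] at hc
      obtain ⟨e, he, hval⟩ := List.mem_filterMap.mp hc
      refine ⟨(cs.drop j).take (e - j), (pvRank_get _ hnd _ m).mp hval, ?_⟩
      rw [← PySem.Chars.exists_prefix_drop_iff_isIn]
      exact ⟨j, List.take_prefix _ _⟩
    · rw [if_neg ha] at hc
      simp at hc
  · rintro ⟨lab, hidx, hin⟩
    have hmemk : lab ∈ (pvDictA g_bss).keys := List.mem_of_getElem? hidx
    have hshape : "S_0x".toList <+: lab := pvKeyShape g_bss hmemk
    have hlen4 : 4 ≤ lab.length := by
      have := hshape.length_le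
      simpa using this
    have hlenmax := pvMaxlen (pvDictA g_bss).keys lab hmemk
    obtain ⟨j, hpre⟩ := (PySem.Chars.exists_prefix_drop_iff_isIn lab cs).mpr hin
    have hjlen : lab.length ≤ cs.length - j := by
      have := hpre.length_le
      simpa using this
    have hjn : j + lab.length ≤ cs.length := by
      have hj : j < cs.length := by
        by_contra hge
        rw [not_lt] at hge
        rw [List.drop_eq_nil_of_le hge] at hpre
        rw [List.prefix_nil] at hpre
        rw [hpre] at hlen4
        simp at hlen4
      omega
    unfold pvHitsB
    apply List.mem_flatMap.mpr
    refine ⟨j, ?_, ?_⟩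
    · rw [List.mem_range]
      omega
    · have ha : PySem.Chars.startswith (cs.drop j) "S_0x".toList = true :=
        (PySem.Chars.startswith_iff _ _).mpr (hshape.trans hpre)
      rw [if_pos ha]
      apply List.mem_filterMap.mpr
      refine ⟨j + lab.length, ?_, ?_⟩
      · rw [List.mem_range'_1]
        have hM : j + lab.length ≤ min cs.length
            (j + ((PySem.List.max? ((pvDictA g_bss).keys.map List.length) id).getD 0)) :=
          le_min hjn (by omega)
        omega
      · have hsl : (cs.drop j).take (j + lab.length - j) = lab := by
          have h1 : j + lab.length - j = lab.length := by omega
          rw [h1]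
          exact (List.prefix_iff_eq_take.mp hpre).symm
        rw [hsl]
        exact (pvRank_get _ hnd _ m).mpr hidx

-- the per-instruction equality
lemma pvMapper_eq (g_bss : List (String × String)) (l : String) :
    pvMapperA (pvDictA g_bss) l =
      pvMapperB (pvDictA g_bss) (pvDictA g_bss).keys (pvRankB (pvDictA g_bss).keys)
        ((PySem.List.max? ((pvDictA g_bss).keys.map List.length) id).getD 0) l := by
  have hnd := pvNodupA g_bss
  unfold pvMapperA pvMapperB
  cases hf : (pvDictA g_bss).keys.find? (fun lab => PySem.Chars.isIn lab l.toList) with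
  | none =>
      have hnil : pvHitsB (pvRankB (pvDictA g_bss).keys)
          ((PySem.List.max? ((pvDictA g_bss).keys.map List.length) id).getD 0) l.toList = [] := by
        rw [List.eq_nil_iff_forall_not_mem]
        intro m hm
        obtain ⟨lab, hidx, hin⟩ := (pvHits_mem g_bss l.toList m).mp hm
        exact List.find?_eq_none.mp hf lab (List.mem_of_getElem? hidx) (by simpa using hin)
      rw [hnil]
      simp [PySem.List.min?]
  | some r =>
      obtain ⟨hQr, as, bs, hsplit, hnotas⟩ := List.find?_eq_some_iff_append.mp hf
      have hQr' : PySem.Chars.isIn r l.toList = true := by simpa using hQr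
      have hkas : (pvDictA g_bss).keys[as.length]? = some r := by
        rw [hsplit, List.getElem?_append_right (le_refl _)]
        simp
      -- as.length is a hit, and every hit is ≥ as.length
      have hmemh : as.length ∈ pvHitsB (pvRankB (pvDictA g_bss).keys)
          ((PySem.List.max? ((pvDictA g_bss).keys.map List.length) id).getD 0) l.toList :=
        (pvHits_mem g_bss l.toList as.length).mpr ⟨r, hkas, hQr'⟩
      have hlow : ∀ m ∈ pvHitsB (pvRankB (pvDictA g_bss).keys)
          ((PySem.List.max? ((pvDictA g_bss).keys.map List.length) id).getD 0) l.toList,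
          as.length ≤ m := by
        intro m hm
        obtain ⟨lab, hidx, hin⟩ := (pvHits_mem g_bss l.toList m).mp hm
        by_contra hlt
        rw [not_le] at hlt
        have hidx' : (pvDictA g_bss).keys[m]? = some lab := hidx
        rw [hsplit, List.getElem?_append_left hlt] at hidx'
        have hmem_as : lab ∈ as := List.mem_of_getElem? hidx'
        have hna := hnotas lab hmem_as
        simp only [Bool.not_eq_eq_eq_not, Bool.not_true] at hna
        rw [hin] at hna
        simp at hna
      cases hmin : PySem.List.min? (pvHitsB (pvRankB (pvDictA g_bss).keys)
          ((PySem.List.max? ((pvDictA g_bss).keys.map List.length) id).getD 0) l.toList) id with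
      | none =>
          exfalso
          rw [PySem.List.min?_eq_none_iff] at hmin
          rw [hmin] at hmemh
          simp at hmemh
      | some m =>
          have h1 : m ≤ as.length := by
            have := PySem.List.min?_isMin hmin as.length hmemh
            simpa using this
          have h2 : as.length ≤ m := hlow m (PySem.List.min?_mem hmin)
          have hme : m = as.length := le_antisymm h1 h2
          simp only [hme, hkas]

-- ===== VERDICT (by name: the statement is the Claim_ definition above) =====
theorem adjust_globallabel_spec : Claim_equal_adjust_globallabel := by
  intro g_bss instr_list _
  unfold Spec_adjust_globallabel adjust_globallabel adjust_globallabel_alt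
  rw [pvDictB_eq]
  by_cases h0 : (pvDictA g_bss).items = []
  · rw [if_pos h0]
    have hall : ∀ l ∈ instr_list, pvMapperA (pvDictA g_bss) l = l := by
      intro l _
      unfold pvMapperA
      have hk : (pvDictA g_bss).keys = [] := by
        show (pvDictA g_bss).items.map Prod.fst = []
        rw [h0]
        rfl
      rw [hk]
      rfl
    calc instr_list.map (pvMapperA (pvDictA g_bss)) = instr_list.map id :=
          List.map_congr_left (fun l hl => hall l hl)
      _ = instr_list := List.map_id _
  · rw [if_neg h0]
    exact List.map_congr_left (fun l _ => pvMapper_eq g_bss l)
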